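-- pv_equiv track=rewrite | github.com/tauvaa/advent_of_code | twenty_twenty_two/day20/question1.py | get_new_index
-- ===== SOURCE A (Python) =====
-- def get_new_index(start_point, shift_num, list_len):
--
--     if shift_num < 0:
--         adder = -1
--     else:
--         adder = 1
--     current_point = start_point
--     for i in range(abs(shift_num)):
--         current_point += adder
--         if current_point == 0 and adder < 0:
--             current_point = list_len - 2
--
--         elif current_point == list_len - 1 and adder > 0:
--             current_point = 1
--     return current_point
-- ===== SOURCE B (Python) =====
-- def get_new_index(start_point, shift_num, list_len):
--     # The cursor walks one slot per step; once it hits a boundary it enters the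
--     # cycle 1..list_len-2, so everything after the first wrap is modular arithmetic.
--     period = list_len - 2
--     if shift_num >= 0:
--         first = list_len - 1 - start_point   # steps until the cursor first hits list_len-1
--         if 0 < first <= shift_num:
--             return (shift_num - first) % period + 1
--     else:
--         first = start_point                  # steps until the cursor first hits 0
--         if 0 < first <= -shift_num:
--             return period - (-shift_num - first) % period
--     return start_point + shift_num           # boundary never reached: plain addition
-- ===== Notes on version B (the rewrite author's own statement) =====
-- stated objective: faster
-- what changed: Replaces the step-by-step loop over abs(shift_num) iterations with O(1) arithmetic: compute the number of steps until the cursor first hits a boundary, then the remainder modulo the cycle length list_len-2; Pre_ excludes degenerate lengths (list_len < 3) whose cycle 1..list_len-2 is empty, where A's wrap target list_len-2 is an accident of its stepwise loop and B's modulus would be <= 0 (ZeroDivisionError when a wrap occurs).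
-- outside the precondition, e.g. on get_new_index(1, -1, 2): A returns 0, B raises ZeroDivisionError; on get_new_index(2, -3, 1): A returns -2, B returns -1
import Mathlib
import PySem

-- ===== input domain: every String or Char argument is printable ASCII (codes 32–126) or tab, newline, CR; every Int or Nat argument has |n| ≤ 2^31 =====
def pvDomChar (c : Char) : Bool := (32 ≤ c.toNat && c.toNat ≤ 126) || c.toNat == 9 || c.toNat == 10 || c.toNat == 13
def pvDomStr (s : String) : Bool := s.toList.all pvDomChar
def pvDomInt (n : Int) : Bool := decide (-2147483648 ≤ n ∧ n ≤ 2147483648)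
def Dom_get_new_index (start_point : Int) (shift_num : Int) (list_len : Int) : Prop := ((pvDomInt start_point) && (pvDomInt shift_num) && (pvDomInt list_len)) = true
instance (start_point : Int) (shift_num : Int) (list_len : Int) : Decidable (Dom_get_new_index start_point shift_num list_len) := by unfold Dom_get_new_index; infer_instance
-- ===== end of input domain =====

-- B replaces A's |shift_num|-step wrap-around loop by O(1) arithmetic (steps to the first boundary hit, then a remainder modulo the cycle length), asymptotically faster; Pre_ excludes degenerate lengths list_len < 3.

-- ===== PORT A =====
-- the body of A's 'for i in range(abs(shift_num))' loop, iterated n times on current_point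
def getNewIndexLoop (adder : Int) (list_len : Int) : Nat → Int → Int
  | 0, current_point => current_point
  | n + 1, current_point =>
      let c := current_point + adder
      let c := if c = 0 ∧ adder < 0 then list_len - 2
               else if c = list_len - 1 ∧ adder > 0 then 1
               else c
      getNewIndexLoop adder list_len n c

def get_new_index (start_point : Int) (shift_num : Int) (list_len : Int) : Int :=
  let adder : Int := if shift_num < 0 then -1 else 1
  getNewIndexLoop adder list_len shift_num.natAbs start_point

-- ===== PORT B =====
def get_new_index_alt (start_point : Int) (shift_num : Int) (list_len : Int) : Int :=
  let period := list_len - 2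
  if 0 ≤ shift_num then
    let first := list_len - 1 - start_point   -- steps until the cursor first hits list_len-1
    if 0 < first ∧ first ≤ shift_num then PySem.Int.mod (shift_num - first) period + 1
    else start_point + shift_num              -- boundary never reached: plain addition
  else
    let first := start_point                  -- steps until the cursor first hits 0
    if 0 < first ∧ first ≤ -shift_num then period - PySem.Int.mod (-shift_num - first) period
    else start_point + shift_num

-- ===== PRECONDITION & SPEC =====
-- Pre_ excludes only inputs on which the cursor wraps on a degenerate length (list_len < 3):
-- there A's wrap target list_len-2 is an accident of its stepwise loop, and B raises
-- ZeroDivisionError (list_len = 2) or its modulus would be negative.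
def Pre_get_new_index (start_point : Int) (shift_num : Int) (list_len : Int) : Prop :=
  3 ≤ list_len ∨
    (0 ≤ shift_num ∧ (list_len - 1 ≤ start_point ∨ start_point + shift_num ≤ list_len - 2)) ∨
    (shift_num < 0 ∧ (start_point ≤ 0 ∨ 1 ≤ start_point + shift_num))
instance (start_point : Int) (shift_num : Int) (list_len : Int) : Decidable (Pre_get_new_index start_point shift_num list_len) := by unfold Pre_get_new_index; infer_instance
def pvWitness_get_new_index : Int × Int × Int := (2, -7, 5)

def Spec_get_new_index (start_point : Int) (shift_num : Int) (list_len : Int) (out : Int) : Prop := out = get_new_index_alt start_point shift_num list_len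
instance (start_point : Int) (shift_num : Int) (list_len : Int) (out : Int) : Decidable (Spec_get_new_index start_point shift_num list_len out) := by unfold Spec_get_new_index; infer_instance

-- ===== CLAIM (what is proved, stated in full; the proofs are below) =====
def Claim_equal_get_new_index : Prop := ∀ (start_point : Int) (shift_num : Int) (list_len : Int), Dom_get_new_index start_point shift_num list_len → Pre_get_new_index start_point shift_num list_len → Spec_get_new_index start_point shift_num list_len (get_new_index start_point shift_num list_len)

-- ===== LEMMAS AND PROOFS =====

-- upward, starting at or above list_len-1: no wrap ever, pure addition
theorem loop_up_hi (L : Int) : ∀ (n : Nat) (c : Int), L - 1 ≤ c →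
    getNewIndexLoop 1 L n c = c + n := by
  intro n
  induction n with
  | zero => intro c _; simp [getNewIndexLoop]
  | succ n ih =>
      intro c hc
      simp only [getNewIndexLoop]
      rw [if_neg (by omega), if_neg (by omega), ih (c + 1) (by omega)]
      push_cast; ring

-- upward, staying at or below list_len-2 throughout: no wrap, pure addition
theorem loop_up_no (L : Int) : ∀ (n : Nat) (c : Int), c ≤ L - 2 → c + n ≤ L - 2 →
    getNewIndexLoop 1 L n c = c + n := by
  intro n
  induction n with
  | zero => intro c _ _; simp [getNewIndexLoop]
  | succ n ih =>
      intro c hc hcn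
      simp only [getNewIndexLoop]
      rw [if_neg (by omega), if_neg (by push_cast at hcn; omega),
          ih (c + 1) (by push_cast at hcn; omega) (by push_cast at hcn ⊢; omega)]
      push_cast; ring

-- upward, crossing list_len-1: reduce to the state right after the first wrap (cursor = 1)
theorem loop_up_wrap (L : Int) : ∀ (n : Nat) (c : Int), c ≤ L - 2 → L - 2 < c + n →
    getNewIndexLoop 1 L n c = getNewIndexLoop 1 L (n - (L - 1 - c).toNat) 1 := by
  intro n
  induction n with
  | zero => intro c hc hcn; push_cast at hcn; omega
  | succ n ih =>
      intro c hc hcn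
      simp only [getNewIndexLoop]
      rw [if_neg (by omega)]
      by_cases hb : c + 1 = L - 1
      · rw [if_pos ⟨hb, by norm_num⟩]
        have : n + 1 - (L - 1 - c).toNat = n := by omega
        rw [this]
      · rw [if_neg (by omega), ih (c + 1) (by omega) (by push_cast at hcn ⊢; omega)]
        have : n + 1 - (L - 1 - c).toNat = n - (L - 1 - (c + 1)).toNat := by omega
        rw [this]

-- upward inside the cycle 1..list_len-2 (list_len ≥ 3): +1 is addition mod (list_len-2)
theorem loop_up_cyc (L : Int) (hL : 3 ≤ L) :
    ∀ (n : Nat) (c : Int), 1 ≤ c → c ≤ L - 2 →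
      getNewIndexLoop 1 L n c = (c - 1 + n) % (L - 2) + 1 := by
  intro n
  induction n with
  | zero =>
      intro c h1 h2
      simp only [getNewIndexLoop, Nat.cast_zero, add_zero]
      rw [Int.emod_eq_of_lt (by omega) (by omega)]
      omega
  | succ n ih =>
      intro c h1 h2
      simp only [getNewIndexLoop]
      split_ifs with ha hb
      · exact absurd ha.2 (by norm_num)
      · rw [ih 1 (by omega) (by omega)]
        have hmod : (c - 1 + ((n:Int) + 1)) % (L - 2) = (1 - 1 + (n : Int)) % (L - 2) := by
          have hc : c - 1 + ((n:Int) + 1) = (1 - 1 + (n:Int)) + (L - 2) * 1 := by omega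
          rw [hc, Int.add_mul_emod_self_left]
        push_cast at hmod ⊢
        omega
      · rw [ih (c + 1) (by omega) (by omega)]
        have : c + 1 - 1 + (n:Int) = c - 1 + ((n:Int) + 1) := by omega
        push_cast
        rw [this]

-- downward, starting at or below 0: no wrap ever, pure subtraction
theorem loop_down_neg (L : Int) : ∀ (n : Nat) (c : Int), c ≤ 0 →
    getNewIndexLoop (-1) L n c = c - n := by
  intro n
  induction n with
  | zero => intro c _; simp [getNewIndexLoop]
  | succ n ih =>
      intro c hc
      simp only [getNewIndexLoop]
      rw [if_neg (by omega), if_neg (by norm_num), ih (c + -1) (by omega)]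
      push_cast; ring

-- downward, staying at or above 1 throughout: no wrap, pure subtraction
theorem loop_down_no (L : Int) : ∀ (n : Nat) (c : Int), 1 ≤ c - n →
    getNewIndexLoop (-1) L n c = c - n := by
  intro n
  induction n with
  | zero => intro c _; simp [getNewIndexLoop]
  | succ n ih =>
      intro c hc
      simp only [getNewIndexLoop]
      rw [if_neg (by push_cast at hc; omega), if_neg (by norm_num),
          ih (c + -1) (by push_cast at hc ⊢; omega)]
      push_cast; ring

-- downward, crossing 0: reduce to the state right after the first wrap (cursor = list_len-2)
theorem loop_down_wrap (L : Int) : ∀ (n : Nat) (c : Int), 1 ≤ c → c - n ≤ 0 →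
    getNewIndexLoop (-1) L n c = getNewIndexLoop (-1) L (n - c.toNat) (L - 2) := by
  intro n
  induction n with
  | zero => intro c hc hcn; push_cast at hcn; omega
  | succ n ih =>
      intro c hc hcn
      simp only [getNewIndexLoop]
      by_cases ha : c + -1 = 0
      · rw [if_pos ⟨ha, by norm_num⟩]
        have : n + 1 - c.toNat = n := by omega
        rw [this]
      · rw [if_neg (by omega), if_neg (by norm_num),
            ih (c + -1) (by omega) (by push_cast at hcn ⊢; omega)]
        have : n + 1 - c.toNat = n - (c + -1).toNat := by omega
        rw [this]

-- downward inside the cycle 1..list_len-2 (list_len ≥ 3): -1 is subtraction mod (list_len-2)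
theorem loop_down_cyc (L : Int) (hL : 3 ≤ L) :
    ∀ (n : Nat) (c : Int), 1 ≤ c → c ≤ L - 2 →
      getNewIndexLoop (-1) L n c = (c - 1 - n) % (L - 2) + 1 := by
  intro n
  induction n with
  | zero =>
      intro c h1 h2
      simp only [getNewIndexLoop, Nat.cast_zero, sub_zero]
      rw [Int.emod_eq_of_lt (by omega) (by omega)]
      omega
  | succ n ih =>
      intro c h1 h2
      simp only [getNewIndexLoop]
      split_ifs with ha hb
      · rw [ih (L - 2) (by omega) (by omega)]
        have hmod : (c - 1 - ((n:Int) + 1)) % (L - 2) = (L - 2 - 1 - (n : Int)) % (L - 2) := by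
          have hc : c - 1 - ((n:Int) + 1) = (L - 2 - 1 - (n:Int)) + (L - 2) * (-1) := by omega
          rw [hc, Int.add_mul_emod_self_left]
        push_cast at hmod ⊢
        omega
      · exact absurd hb.2 (by norm_num)
      · rw [show c + -1 = c - 1 by omega, ih (c - 1) (by omega) (by omega)]
        have : c - 1 - 1 - (n:Int) = c - 1 - ((n:Int) + 1) := by omega
        push_cast
        rw [this]

-- remainder identity used in the downward wrap case
theorem mod_reflect (m k : Int) (hm : 0 < m) : (m - 1 - k) % m + 1 = m - k % m := by
  have h0 : 0 ≤ k % m := Int.emod_nonneg k (by omega)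
  have h1 : k % m < m := Int.emod_lt_of_pos k hm
  have hneg : m - 1 - k = (m - 1 - k % m) + m * (-(k / m)) := by
    linear_combination Int.emod_add_ediv k m
  rw [hneg, Int.add_mul_emod_self_left, Int.emod_eq_of_lt (by omega) (by omega)]
  omega

-- ===== VERDICT (by name: the statement is the Claim_ definition above) =====
theorem get_new_index_spec : Claim_equal_get_new_index := by
  intro s sh L _ hpre
  unfold Pre_get_new_index at hpre
  unfold Spec_get_new_index get_new_index get_new_index_alt
  by_cases hs : 0 ≤ sh
  · rw [if_pos hs, if_neg (by omega)]
    have hn : ((sh.natAbs : Int)) = sh := by omega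
    by_cases hw : 0 < L - 1 - s ∧ L - 1 - s ≤ sh
    · rw [if_pos hw]
      obtain ⟨hw1, hw2⟩ := hw
      have hL : 3 ≤ L := by omega
      rw [loop_up_wrap L sh.natAbs s (by omega) (by omega)]
      set k : Nat := sh.natAbs - (L - 1 - s).toNat with hk
      have hkv : (k : Int) = sh - (L - 1 - s) := by omega
      rw [loop_up_cyc L hL k 1 (by omega) (by omega),
          PySem.Int.mod_eq_emod_of_pos (by omega : (0:Int) < L - 2)]
      congr 2
      omega
    · rw [if_neg hw]
      push Not at hw
      by_cases h2 : s ≤ L - 2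
      · rw [loop_up_no L sh.natAbs s h2 (by omega)]; omega
      · rw [loop_up_hi L sh.natAbs s (by omega)]; omega
  · rw [if_neg hs, if_pos (by omega)]
    have hn : ((sh.natAbs : Int)) = -sh := by omega
    by_cases hw : 0 < s ∧ s ≤ -sh
    · rw [if_pos hw]
      obtain ⟨hw1, hw2⟩ := hw
      have hL : 3 ≤ L := by omega
      rw [loop_down_wrap L sh.natAbs s (by omega) (by omega)]
      set k : Nat := sh.natAbs - s.toNat with hk
      have hkv : (k : Int) = -sh - s := by omega
      rw [loop_down_cyc L hL k (L - 2) (by omega) (by omega),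
          PySem.Int.mod_eq_emod_of_pos (by omega : (0:Int) < L - 2)]
      rw [show L - 2 - 1 - (k:Int) = (L - 2) - 1 - (-sh - s) by omega]
      exact mod_reflect (L - 2) (-sh - s) (by omega)
    · rw [if_neg hw]
      push Not at hw
      by_cases h1 : s ≤ 0
      · rw [loop_down_neg L sh.natAbs s h1]; omega
      · rw [loop_down_no L sh.natAbs s (by omega)]; omega
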